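-- pv_equiv track=rewrite | github.com/neandrey/pyYanDex | 1.py | func
-- ===== SOURCE A (Python) =====
-- def func(arg1, arg2):
--     rets = {}
--     for i in arg1:
--         if arg2 == []:
--             rets[i] = None
--         for j in arg2:
--             rets[i] = j
--             arg2 = arg2[1:]
--             break
--     return rets
-- ===== SOURCE B (Python) =====
-- def func(arg1, arg2):
--     rets = dict(zip(arg1, arg2))
--     for i in arg1[len(arg2):]:
--         rets[i] = None
--     return rets
-- ===== Notes on version B (the rewrite author's own statement) =====
-- stated objective: faster
-- what changed: Replaces A's single interleaved loop that consumes one arg2 value per key (re-slicing arg2 each step) with two bulk passes: dict(zip(arg1, arg2)) builds the whole pairing at once, then a second loop None-fills only the trailing keys arg1[len(arg2):].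
import Mathlib
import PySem

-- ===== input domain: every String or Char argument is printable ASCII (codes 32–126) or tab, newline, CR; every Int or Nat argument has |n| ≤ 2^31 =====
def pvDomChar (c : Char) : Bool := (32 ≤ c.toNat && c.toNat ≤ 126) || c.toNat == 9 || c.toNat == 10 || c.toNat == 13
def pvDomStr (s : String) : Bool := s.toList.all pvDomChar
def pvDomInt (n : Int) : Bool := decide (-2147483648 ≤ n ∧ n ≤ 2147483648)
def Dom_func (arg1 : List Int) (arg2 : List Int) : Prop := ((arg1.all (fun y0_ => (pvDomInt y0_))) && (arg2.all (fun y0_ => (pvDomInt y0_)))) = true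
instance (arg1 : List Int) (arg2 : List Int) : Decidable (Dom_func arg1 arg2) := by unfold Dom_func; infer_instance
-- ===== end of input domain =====

-- B builds the positional pairing in one bulk dict(zip(...)) pass and then None-fills only the
-- trailing unmatched keys in a second pass, instead of A's interleaved consume-one-value-per-key loop.

-- ===== PORT A =====
-- A's loop over arg1 carries the dict and the remaining (repeatedly sliced) arg2 as state;
-- the inner 'for j in arg2: …; break' takes the head (if any), stores it, and drops it.
def funcLoop : List Int → List Int → PySem.Dict Int (Option Int) → PySem.Dict Int (Option Int)
  | [], _, rets => rets
  | i :: rest, ys, rets =>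
    match ys with
    | [] => funcLoop rest [] (rets.insert i none)
    | j :: ys' => funcLoop rest ys' (rets.insert i (some j))

def func (arg1 : List Int) (arg2 : List Int) : List (Int × Option Int) :=
  (funcLoop arg1 arg2 PySem.Dict.empty).items

-- ===== PORT B =====
def func_alt (arg1 : List Int) (arg2 : List Int) : List (Int × Option Int) :=
  -- rets = dict(zip(arg1, arg2))
  let rets := (arg1.zip arg2).foldl (fun d p => d.insert p.1 (some p.2)) PySem.Dict.empty
  -- for i in arg1[len(arg2):]: rets[i] = None   (arg1[len(arg2):] with a nonnegative bound = drop)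
  ((arg1.drop arg2.length).foldl (fun d i => d.insert i none) rets).items

-- ===== PRECONDITION & SPEC =====
def Spec_func (arg1 : List Int) (arg2 : List Int) (out : List (Int × Option Int)) : Prop := out = func_alt arg1 arg2
instance (arg1 : List Int) (arg2 : List Int) (out : List (Int × Option Int)) : Decidable (Spec_func arg1 arg2 out) := by unfold Spec_func; infer_instance

-- ===== CLAIM (what is proved, stated in full; the proofs are below) =====
def Claim_equal_func : Prop := ∀ (arg1 : List Int) (arg2 : List Int), Dom_func arg1 arg2 → Spec_func arg1 arg2 (func arg1 arg2)

-- ===== LEMMAS AND PROOFS =====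

-- A's single interleaved loop equals B's two passes, for any starting dict and any remaining values.
theorem funcLoop_eq (arg1 : List Int) : ∀ (arg2 : List Int) (d : PySem.Dict Int (Option Int)),
    funcLoop arg1 arg2 d =
      (arg1.drop arg2.length).foldl (fun d i => d.insert i none)
        ((arg1.zip arg2).foldl (fun d p => d.insert p.1 (some p.2)) d) := by
  induction arg1 with
  | nil => intro arg2 d; simp [funcLoop]
  | cons i rest ih =>
    intro arg2 d
    cases arg2 with
    | nil => simp [funcLoop, ih [] (d.insert i none)]
    | cons j ys' => simp [funcLoop, ih ys' (d.insert i (some j))]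

-- ===== VERDICT (by name: the statement is the Claim_ definition above) =====
theorem func_spec : Claim_equal_func := by
  intro arg1 arg2 _
  unfold Spec_func func func_alt
  rw [funcLoop_eq]
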